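-- pv_equiv track=rewrite | github.com/runarer/advent-of-code | 2020/19/aoc2020_19_2.py | match_message
-- ===== SOURCE A (Python) =====
-- def match_message(message, list_42, list_31):
--     """ Matches message to 42 and 31s"""
--     message_parts = len(message)
--
--     # A message must have at least 3 parts
--     if message_parts < 3:
--         return False
--
--     # Does it start with at least 2 42?
--     if message[0] not in list_42 or message[1] not in list_42:
--         return False
--
--     match_to_42 = 2
--     mp_index = 2
--
--     # Match 42's
--     while message[mp_index] in list_42:
--         mp_index += 1
--         match_to_42 += 1
--         # Did we reach end of message?
--         if mp_index == message_parts: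
--             return False
--
--     # Match 31's, need to be at least one.
--     if message[mp_index] not in list_31:
--         return False
--     mp_index += 1
--     match_to_31 = 1
--
--     for message_part in message[mp_index:]:
--         if message_part not in list_31:
--             break
--         match_to_31 += 1
--
--     # Did we match the hole message?
--     if match_to_42 + match_to_31 != len(message):
--         return False
--
--     # Is the combination of 31 and 42 right?
--     if match_to_42 - match_to_31 < 1:
--         return False
--
--     # We have a match
--     return True
-- ===== SOURCE B (Python) =====
-- def match_message(message, list_42, list_31):
--     """ Matches message to 42 and 31s"""
--     # Single-pass deterministic automaton over the token stream:
--     # IN42 -> IN31 -> DEAD, counting tokens consumed in each phase.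
--     IN42, IN31, DEAD = 0, 1, 2
--     state, c42, c31 = IN42, 0, 0
--     for tok in message:
--         if state == IN42:
--             if tok in list_42:
--                 c42 += 1
--             elif tok in list_31:
--                 state, c31 = IN31, 1
--             else:
--                 state = DEAD
--         elif state == IN31:
--             if tok in list_31:
--                 c31 += 1
--             else:
--                 state = DEAD
--     return state == IN31 and c42 > c31
-- ===== Notes on version B (the rewrite author's own statement) =====
-- stated objective: alternative
-- what changed: B replaces A's staged scans (guarded 2-token check, indexed while loop over 42s, for loop over a slice counting 31s, then a sum-and-difference reconciliation) with a single-pass three-state automaton (IN42/IN31/DEAD) folded over the tokens, returning state==IN31 and c42>c31.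
import Mathlib
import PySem

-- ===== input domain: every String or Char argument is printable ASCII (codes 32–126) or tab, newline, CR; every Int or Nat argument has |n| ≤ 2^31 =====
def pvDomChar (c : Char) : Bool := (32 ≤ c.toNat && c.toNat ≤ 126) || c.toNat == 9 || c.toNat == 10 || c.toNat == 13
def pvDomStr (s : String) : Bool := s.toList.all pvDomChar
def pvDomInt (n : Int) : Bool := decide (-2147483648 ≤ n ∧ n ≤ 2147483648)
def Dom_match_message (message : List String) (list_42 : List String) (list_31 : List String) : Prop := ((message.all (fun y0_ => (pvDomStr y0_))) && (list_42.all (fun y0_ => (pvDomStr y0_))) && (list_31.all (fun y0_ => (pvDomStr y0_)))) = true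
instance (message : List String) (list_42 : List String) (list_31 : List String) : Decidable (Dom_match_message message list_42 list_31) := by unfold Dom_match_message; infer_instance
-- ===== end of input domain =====

-- B replaces A's staged scans and count reconciliation with a single-pass three-state
-- automaton (IN42/IN31/DEAD) folded over the tokens (objective: alternative).


-- ===== PORT A =====
-- A's while loop matching 42s: index mp_index and counter match_to_42 advance together;
-- returns none where A `return False` on reaching the end of the message, else (mp_index, match_to_42).
def loopA42 (message : List String) (list_42 : List String) (i cnt : Nat) :
    Option (Nat × Nat) :=
  if h : i < message.length then
    if message[i] ∈ list_42 then
      loopA42 message list_42 (i + 1) (cnt + 1)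
    else some (i, cnt)
  else none
termination_by message.length - i

-- A's for loop over message[mp_index:] counting consecutive 31s, breaking on the first mismatch.
def loopA31 (rest : List String) (list_31 : List String) (cnt : Nat) : Nat :=
  match rest with
  | [] => cnt
  | x :: xs => if x ∈ list_31 then loopA31 xs list_31 (cnt + 1) else cnt

def match_message (message : List String) (list_42 : List String) (list_31 : List String) : Bool :=
  let message_parts := message.length
  if message_parts < 3 then false
  else if message.getD 0 "" ∉ list_42 ∨ message.getD 1 "" ∉ list_42 then false
  else
    match loopA42 message list_42 2 2 with
    | none => false
    | some (mp_index, match_to_42) =>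
      if message.getD mp_index "" ∉ list_31 then false
      else
        let match_to_31 := loopA31 (message.drop (mp_index + 1)) list_31 1
        if match_to_42 + match_to_31 ≠ message.length then false
        else if (match_to_42 : Int) - (match_to_31 : Int) < 1 then false
        else true

-- ===== PORT B =====
-- B's automaton step: state 0 = IN42, 1 = IN31, 2 = DEAD; carries (state, c42, c31).
def stepB (list_42 : List String) (list_31 : List String)
    (s : Nat × Nat × Nat) (tok : String) : Nat × Nat × Nat :=
  match s with
  | (0, c42, c31) =>
    if tok ∈ list_42 then (0, c42 + 1, c31)
    else if tok ∈ list_31 then (1, c42, 1)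
    else (2, c42, c31)
  | (1, c42, c31) =>
    if tok ∈ list_31 then (1, c42, c31 + 1) else (2, c42, c31)
  | s => s

def match_message_alt (message : List String) (list_42 : List String) (list_31 : List String) : Bool :=
  let r := message.foldl (stepB list_42 list_31) (0, 0, 0)
  decide (r.1 = 1 ∧ r.2.2 < r.2.1)

-- ===== PRECONDITION & SPEC =====
def Spec_match_message (message : List String) (list_42 : List String) (list_31 : List String) (out : Bool) : Prop := out = match_message_alt message list_42 list_31
instance (message : List String) (list_42 : List String) (list_31 : List String) (out : Bool) : Decidable (Spec_match_message message list_42 list_31 out) := by unfold Spec_match_message; infer_instance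

-- ===== CLAIM (what is proved, stated in full; the proofs are below) =====
def Claim_equal_match_message : Prop := ∀ (message : List String) (list_42 : List String) (list_31 : List String), Dom_match_message message list_42 list_31 → Spec_match_message message list_42 list_31 (match_message message list_42 list_31)

-- ===== LEMMAS AND PROOFS =====

-- Common reference form both ports are reduced to: maximal 42-prefix k, direct suffix check.
def refB (message : List String) (list_42 : List String) (list_31 : List String) : Bool :=
  let n := message.length
  let k := (message.takeWhile (fun t => decide (t ∈ list_42))).length
  let count_31 := n - k
  if k < 2 ∨ count_31 < 1 then false
  else if ¬ (message.drop k).all (fun t => decide (t ∈ list_31)) then false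
  else decide (1 ≤ (k : Int) - (count_31 : Int))

theorem tw_le {α : Type} (p : α → Bool) (l : List α) :
    (l.takeWhile p).length ≤ l.length := by
  induction l with
  | nil => simp
  | cons a t ih => rw [List.takeWhile_cons]; split <;> simp <;> omega

theorem tw_get {α : Type} (p : α → Bool) (l : List α) (i : Nat)
    (hk : i < (l.takeWhile p).length) (hi : i < l.length) : p l[i] = true := by
  induction l generalizing i with
  | nil => simp at hi
  | cons a t ih =>
    rw [List.takeWhile_cons] at hk
    by_cases hp : p a = true
    · rw [if_pos hp] at hk
      cases i with
      | zero => simpa using hp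
      | succ j =>
        simp only [List.getElem_cons_succ]
        exact ih j (by simpa using hk) (by simpa using hi)
    · simp [hp] at hk

theorem tw_get' (p : String → Bool) (l : List String) (i : Nat)
    (hk : i < (l.takeWhile p).length) (hi : i < l.length) : p (l.getD i "") = true := by
  rw [List.getD_eq_getElem l "" hi]
  exact tw_get p l i hk hi

theorem tw_stop {α : Type} (p : α → Bool) (l : List α)
    (h : (l.takeWhile p).length < l.length) :
    p (l[(l.takeWhile p).length]'h) = false := by
  induction l with
  | nil => simp at h
  | cons a t ih =>
    by_cases hp : p a = true
    · have harr : ((a :: t).takeWhile p).length = (t.takeWhile p).length + 1 := by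
        rw [List.takeWhile_cons, if_pos hp]; simp
      have h' : (t.takeWhile p).length < t.length := by
        simp [harr] at h; omega
      have := ih h'
      simp only [harr, List.getElem_cons_succ]
      exact this
    · have harr : ((a :: t).takeWhile p).length = 0 := by
        rw [List.takeWhile_cons, if_neg hp]; simp
      simp only [harr, List.getElem_cons_zero]
      simpa using hp

theorem tw_stop' (p : String → Bool) (l : List String)
    (h : (l.takeWhile p).length < l.length) :
    p (l.getD (l.takeWhile p).length "") = false := by
  rw [List.getD_eq_getElem l "" h]
  exact tw_stop p l h

theorem tw_all {α : Type} (p : α → Bool) (l : List α) :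
    ((l.takeWhile p).length = l.length) ↔ l.all p = true := by
  induction l with
  | nil => simp
  | cons a t ih =>
    rw [List.takeWhile_cons]
    by_cases hp : p a = true
    · simp [hp, ih]
    · simp [hp]

theorem loopA42_eq (message list_42 : List String) (i : Nat)
    (hik : i ≤ (message.takeWhile (fun t => decide (t ∈ list_42))).length) :
    loopA42 message list_42 i i =
      (if (message.takeWhile (fun t => decide (t ∈ list_42))).length = message.length then none
       else some ((message.takeWhile (fun t => decide (t ∈ list_42))).length,
                  (message.takeWhile (fun t => decide (t ∈ list_42))).length)) := by
  have hkn := tw_le (fun t => decide (t ∈ list_42)) message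
  rw [loopA42]
  by_cases hin : i < message.length
  · rw [dif_pos hin]
    have hgdi : message.getD i "" = message[i] := List.getD_eq_getElem message "" hin
    by_cases hmem : message[i] ∈ list_42
    · rw [if_pos hmem]
      have hlt : i < (message.takeWhile (fun t => decide (t ∈ list_42))).length := by
        rcases Nat.lt_or_ge i (message.takeWhile (fun t => decide (t ∈ list_42))).length with h | h
        · exact h
        · exfalso
          have hie : i = (message.takeWhile (fun t => decide (t ∈ list_42))).length := by omega
          have hstop := tw_stop' (fun t => decide (t ∈ list_42)) message (by omega)
          rw [← hie, hgdi] at hstop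
          simp [hmem] at hstop
      exact loopA42_eq message list_42 (i + 1) hlt
    · rw [if_neg hmem]
      have hie : i = (message.takeWhile (fun t => decide (t ∈ list_42))).length := by
        rcases Nat.lt_or_ge i (message.takeWhile (fun t => decide (t ∈ list_42))).length with h | h
        · exfalso
          have := tw_get (fun t => decide (t ∈ list_42)) message i h hin
          simp [hmem] at this
        · omega
      rw [if_neg (by omega)]
      rw [hie]
  · rw [dif_neg hin]
    rw [if_pos (by omega)]
termination_by message.length - i

theorem loopA31_eq (rest list_31 : List String) (cnt : Nat) :
    loopA31 rest list_31 cnt = cnt + (rest.takeWhile (fun t => decide (t ∈ list_31))).length := by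
  induction rest generalizing cnt with
  | nil => simp [loopA31]
  | cons x xs ih =>
    rw [loopA31, List.takeWhile_cons]
    by_cases hx : x ∈ list_31 <;> simp [hx, ih] <;> omega

theorem match_message_eq_ref (message list_42 list_31 : List String) :
    match_message message list_42 list_31 = refB message list_42 list_31 := by
  have hkn := tw_le (fun t => decide (t ∈ list_42)) message
  set k := (message.takeWhile (fun t => decide (t ∈ list_42))).length with hkdef
  clear_value k
  by_cases h3 : message.length < 3
  · have hB : refB message list_42 list_31 = false := by
      unfold refB
      rw [← hkdef]
      dsimp only
      rw [if_pos (show k < 2 ∨ message.length - k < 1 by omega)]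
    rw [hB]
    unfold match_message
    rw [if_pos h3]
  · by_cases h01 : message.getD 0 "" ∉ list_42 ∨ message.getD 1 "" ∉ list_42
    · have hk2 : k < 2 := by
        by_contra hge
        push_neg at hge
        rcases h01 with h0 | h1
        · have := tw_get' (fun t => decide (t ∈ list_42)) message 0 (by omega) (by omega)
          rw [decide_eq_true_iff] at this; exact h0 this
        · have := tw_get' (fun t => decide (t ∈ list_42)) message 1 (by omega) (by omega)
          rw [decide_eq_true_iff] at this; exact h1 this
      have hB : refB message list_42 list_31 = false := by
        unfold refB
        rw [← hkdef]
        dsimp only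
        rw [if_pos (show k < 2 ∨ message.length - k < 1 by omega)]
      rw [hB]
      unfold match_message
      rw [if_neg h3, if_pos h01]
    · push_neg at h01
      have hk2 : 2 ≤ k := by
        by_contra hlt
        push_neg at hlt
        have hstop := tw_stop' (fun t => decide (t ∈ list_42)) message (by omega)
        rw [← hkdef, decide_eq_false_iff_not] at hstop
        have hk01 : k = 0 ∨ k = 1 := by omega
        rcases hk01 with h | h <;> rw [h] at hstop
        · exact hstop h01.1
        · exact hstop h01.2
      have hloop := loopA42_eq message list_42 2 (by omega)
      rw [← hkdef] at hloop
      unfold match_message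
      rw [if_neg h3, if_neg (by tauto), hloop]
      by_cases hke : k = message.length
      · rw [if_pos hke]
        unfold refB
        rw [← hkdef]
        dsimp only
        rw [if_pos (show k < 2 ∨ message.length - k < 1 by omega)]
      · rw [if_neg hke]
        have hklt : k < message.length := by omega
        have hdropk : message.drop k = message[k] :: message.drop (k + 1) :=
          List.drop_eq_getElem_cons hklt
        have hgd : message.getD k "" = message[k] := List.getD_eq_getElem message "" hklt
        show (if message.getD k "" ∉ list_31 then false
              else
                let match_to_31 := loopA31 (message.drop (k + 1)) list_31 1
                if k + match_to_31 ≠ message.length then false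
                else if (k : Int) - (match_to_31 : Int) < 1 then false
                else true) = refB message list_42 list_31
        by_cases hk31 : message[k] ∈ list_31
        · rw [if_neg (by rw [hgd]; simpa using hk31)]
          have hc31 : loopA31 (message.drop (k + 1)) list_31 1 =
              1 + ((message.drop (k + 1)).takeWhile (fun t => decide (t ∈ list_31))).length :=
            loopA31_eq _ _ _
          set t := ((message.drop (k + 1)).takeWhile (fun t => decide (t ∈ list_31))).length with htdef
          have htle : t ≤ message.length - (k + 1) := by
            have h5 := tw_le (fun t => decide (t ∈ list_31)) (message.drop (k + 1))
            rw [← htdef] at h5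
            simpa using h5
          have htall := tw_all (fun t => decide (t ∈ list_31)) (message.drop (k + 1))
          rw [← htdef] at htall
          clear_value t
          simp only [hc31]
          by_cases hall : (message.drop (k + 1)).all (fun t => decide (t ∈ list_31)) = true
          · have hteq : t = message.length - (k + 1) := by
              have := htall.mpr hall
              simpa using this
            have hBall : (message.drop k).all (fun t => decide (t ∈ list_31)) = true := by
              rw [hdropk, List.all_cons]
              simp [hk31, hall]
            have hB : refB message list_42 list_31 =
                decide (1 ≤ (k : Int) - ((message.length - k : Nat) : Int)) := by
              unfold refB
              rw [← hkdef]
              dsimp only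
              rw [if_neg (show ¬ (k < 2 ∨ message.length - k < 1) by omega),
                  if_neg (not_not_intro hBall)]
            rw [hB, if_neg (show ¬ (k + (1 + t) ≠ message.length) by omega)]
            by_cases hc : (k : Int) - ((1 + t : Nat) : Int) < 1
            · rw [if_pos hc]
              have hd : ¬ (1 ≤ (k : Int) - ((message.length - k : Nat) : Int)) := by
                push_cast at hc ⊢
                omega
              simp [hd]
            · rw [if_neg hc]
              have hd : 1 ≤ (k : Int) - ((message.length - k : Nat) : Int) := by
                push_cast at hc ⊢
                omega
              simp [hd]
          · have htne : t < message.length - (k + 1) := by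
              rcases Nat.lt_or_ge t (message.length - (k + 1)) with h | h
              · exact h
              · exfalso
                apply hall
                apply htall.mp
                simp only [List.length_drop]
                omega
            have hBall : ¬ ((message.drop k).all (fun t => decide (t ∈ list_31)) = true) := by
              rw [hdropk, List.all_cons]
              simp [hall]
            rw [if_pos (show k + (1 + t) ≠ message.length by omega)]
            unfold refB
            rw [← hkdef]
            dsimp only
            rw [if_neg (show ¬ (k < 2 ∨ message.length - k < 1) by omega),
                if_pos hBall]
        · rw [if_pos (by rw [hgd]; simpa using hk31)]
          have hBall : ¬ ((message.drop k).all (fun t => decide (t ∈ list_31)) = true) := by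
            rw [hdropk, List.all_cons]
            simp [hk31]
          unfold refB
          rw [← hkdef]
          dsimp only
          rw [if_neg (show ¬ (k < 2 ∨ message.length - k < 1) by omega),
              if_pos hBall]

-- The DEAD state absorbs.
theorem foldB_dead (list_42 list_31 : List String) (l : List String) (a b : Nat) :
    l.foldl (stepB list_42 list_31) (2, a, b) = (2, a, b) := by
  induction l with
  | nil => rfl
  | cons x xs ih => simpa [List.foldl_cons, stepB] using ih

-- In IN42, each matching token bumps c42.
theorem foldB_phase0 (list_42 list_31 : List String) (l : List String)
    (h : ∀ x ∈ l, x ∈ list_42) (a : Nat) :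
    l.foldl (stepB list_42 list_31) (0, a, 0) = (0, a + l.length, 0) := by
  induction l generalizing a with
  | nil => simp
  | cons x xs ih =>
    have hx : x ∈ list_42 := h x (List.mem_cons_self ..)
    rw [List.foldl_cons]
    show xs.foldl (stepB list_42 list_31) (stepB list_42 list_31 (0, a, 0) x) = _
    rw [show stepB list_42 list_31 (0, a, 0) x = (0, a + 1, 0) by simp [stepB, hx]]
    rw [ih (fun y hy => h y (List.mem_cons_of_mem _ hy))]
    simp; omega

-- In IN31, the fold either consumes everything (all 31s) or dies.
theorem foldB_phase1 (list_42 list_31 : List String) (l : List String) (a b : Nat) :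
    l.foldl (stepB list_42 list_31) (1, a, b) =
      (if l.all (fun t => decide (t ∈ list_31)) then (1, a, b + l.length)
       else (2, a, b + (l.takeWhile (fun t => decide (t ∈ list_31))).length)) := by
  induction l generalizing b with
  | nil => simp
  | cons x xs ih =>
    rw [List.foldl_cons]
    by_cases hx : x ∈ list_31
    · show xs.foldl (stepB list_42 list_31) (stepB list_42 list_31 (1, a, b) x) = _
      rw [show stepB list_42 list_31 (1, a, b) x = (1, a, b + 1) by simp [stepB, hx]]
      rw [ih (b + 1)]
      by_cases hall : xs.all (fun t => decide (t ∈ list_31)) = true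
      · simp [List.all_cons, List.takeWhile_cons, hall, hx, Prod.ext_iff]; omega
      · simp [List.all_cons, List.takeWhile_cons, hall, hx, Prod.ext_iff]; omega
    · show xs.foldl (stepB list_42 list_31) (stepB list_42 list_31 (1, a, b) x) = _
      rw [show stepB list_42 list_31 (1, a, b) x = (2, a, b) by simp [stepB, hx]]
      rw [foldB_dead]
      rw [List.all_cons, List.takeWhile_cons]
      simp [hx]

theorem dw_eq_drop {α : Type} (p : α → Bool) (l : List α) :
    l.dropWhile p = l.drop (l.takeWhile p).length := by
  induction l with
  | nil => rfl
  | cons a t ih =>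
    rw [List.dropWhile_cons, List.takeWhile_cons]
    by_cases hp : p a = true
    · simp [hp, ih]
    · simp [hp]

theorem match_message_alt_eq_ref (message list_42 list_31 : List String) :
    match_message_alt message list_42 list_31 = refB message list_42 list_31 := by
  have hkn := tw_le (fun t => decide (t ∈ list_42)) message
  have hsplit := List.takeWhile_append_dropWhile
      (p := fun t => decide (t ∈ list_42)) (l := message)
  have hdw := dw_eq_drop (fun t => decide (t ∈ list_42)) message
  set k := (message.takeWhile (fun t => decide (t ∈ list_42))).length with hkdef
  have hfold : message.foldl (stepB list_42 list_31) (0, 0, 0) =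
      (message.drop k).foldl (stepB list_42 list_31) (0, k, 0) := by
    conv_lhs => rw [← hsplit]
    rw [List.foldl_append]
    rw [foldB_phase0 list_42 list_31 _
      (fun x hx => by simpa using List.mem_takeWhile_imp hx) 0]
    rw [← hdw, ← hkdef]
    simp
  unfold match_message_alt refB
  rw [← hkdef]
  dsimp only
  rw [hfold]
  by_cases hke : k = message.length
  · rw [List.drop_eq_nil_of_le (by omega)]
    rw [if_pos (show k < 2 ∨ message.length - k < 1 by omega)]
    simp
  · have hklt : k < message.length := by omega
    have hdropk : message.drop k = message[k] :: message.drop (k + 1) :=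
      List.drop_eq_getElem_cons hklt
    have hk42 : message[k] ∉ list_42 := by
      have hlt2 : (message.takeWhile (fun t => decide (t ∈ list_42))).length <
          message.length := by rw [← hkdef]; exact hklt
      have := tw_stop' (fun t => decide (t ∈ list_42)) message hlt2
      rw [← hkdef] at this
      rw [List.getD_eq_getElem message "" hklt] at this
      simpa using this
    rw [hdropk, List.foldl_cons]
    by_cases hk31 : message[k] ∈ list_31
    · rw [show stepB list_42 list_31 (0, k, 0) message[k] = (1, k, 1) by
        simp [stepB, hk42, hk31]]
      rw [foldB_phase1]
      by_cases hall : (message.drop (k+1)).all (fun t => decide (t ∈ list_31)) = true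
      · rw [if_pos hall]
        have hBall : ((message[k] :: message.drop (k+1)).all
            (fun t => decide (t ∈ list_31))) = true := by
          rw [List.all_cons]; simp [hk31, hall]
        by_cases hk2 : k < 2 ∨ message.length - k < 1
        · rw [if_pos hk2]
          simp only [List.length_drop]
          have hnc : ¬ (1 + (message.length - (k+1)) < k) := by omega
          simp [hnc]
        · rw [if_neg hk2, if_neg (not_not_intro hBall)]
          simp only [List.length_drop]
          by_cases hc : 1 + (message.length - (k+1)) < k
          · have h2 : 1 ≤ (k : Int) - ((message.length - k : Nat) : Int) := by omega
            simp [hc, h2]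
          · have h2 : ¬ (1 ≤ (k : Int) - ((message.length - k : Nat) : Int)) := by omega
            simp [hc, h2]
      · rw [if_neg hall]
        have hBall : ¬ ((message[k] :: message.drop (k+1)).all
            (fun t => decide (t ∈ list_31)) = true) := by
          rw [List.all_cons]; simp [hall]
        by_cases hk2 : k < 2 ∨ message.length - k < 1
        · rw [if_pos hk2]; simp
        · rw [if_neg hk2, if_pos hBall]; simp
    · rw [show stepB list_42 list_31 (0, k, 0) message[k] = (2, k, 0) by
        simp [stepB, hk42, hk31]]
      rw [foldB_dead]
      have hBall : ¬ ((message[k] :: message.drop (k+1)).all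
          (fun t => decide (t ∈ list_31)) = true) := by
        rw [List.all_cons]; simp [hk31]
      by_cases hk2 : k < 2 ∨ message.length - k < 1
      · rw [if_pos hk2]; simp
      · rw [if_neg hk2, if_pos hBall]; simp

-- ===== VERDICT (by name: the statement is the Claim_ definition above) =====
theorem match_message_spec : Claim_equal_match_message := by
  intro message list_42 list_31 _
  show match_message message list_42 list_31 = match_message_alt message list_42 list_31
  rw [match_message_eq_ref, match_message_alt_eq_ref]
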